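-- pv_equiv track=rewrite | github.com/fareedfauzi/YARA-PlayGround | Scripts/yara_playground.py | _get_line_map
-- ===== SOURCE A (Python) =====
-- def _get_line_map(text):
--     """Builds a fast lookup map for character offsets to line numbers."""
--     line_offsets = [0]
--     curr = 0
--     while True:
--         idx = text.find('\n', curr)
--         if idx == -1: break
--         line_offsets.append(idx + 1)
--         curr = idx + 1
--     return line_offsets
-- ===== SOURCE B (Python) =====
-- def _get_line_map(text):
--     """Builds a fast lookup map for character offsets to line numbers."""
--     parts = text.split('\n')
--     offsets = [0]
--     pos = 0
--     for part in parts[:-1]: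
--         pos += len(part) + 1
--         offsets.append(pos)
--     return offsets
-- ===== Notes on version B (the rewrite author's own statement) =====
-- stated objective: alternative
-- what changed: Replaces the incremental find-next-newline search loop with a newline split followed by a prefix-sum accumulation of segment lengths.
import Mathlib
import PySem

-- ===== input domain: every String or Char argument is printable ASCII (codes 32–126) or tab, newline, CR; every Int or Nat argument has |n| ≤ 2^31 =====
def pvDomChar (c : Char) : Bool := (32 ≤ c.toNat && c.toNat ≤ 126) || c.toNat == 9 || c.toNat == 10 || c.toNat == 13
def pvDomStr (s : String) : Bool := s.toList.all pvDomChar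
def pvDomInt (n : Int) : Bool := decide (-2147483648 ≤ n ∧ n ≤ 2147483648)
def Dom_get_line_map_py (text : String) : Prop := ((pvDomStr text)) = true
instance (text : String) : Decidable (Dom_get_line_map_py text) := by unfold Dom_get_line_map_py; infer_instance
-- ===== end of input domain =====

-- B replaces A's incremental find('\n', curr) loop by split('\n') plus a prefix-sum
-- accumulation of segment lengths (alternative decomposition, same cost).

-- ===== PORT A =====
-- A's while-loop: repeatedly text.find('\n', curr); the `curr ≤ length` guard only
-- makes the recursion total — it holds on every reachable iteration (curr = 0 or idx+1 ≤ length).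
def pvALoop (s : List Char) (curr : Nat) (acc : List Int) : List Int :=
  if hk : curr ≤ s.length then
    let idx := PySem.Chars.findFrom s ['\n'] (curr : Int) none
    if h : idx = -1 then acc
    else pvALoop s (idx.toNat + 1) (acc ++ [idx + 1])
  else acc
termination_by s.length + 1 - curr
decreasing_by
  have spec := PySem.Chars.findFrom_natCast_spec s ['\n'] curr hk h
  have h1 : (curr : Int) ≤ idx := spec.1
  have h2 : idx.toNat < s.length := by
    have := spec.2.1
    have hlen : (['\n'] : List Char).length ≤ (List.drop idx.toNat s).length :=
      List.IsPrefix.length_le this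
    simp [List.length_drop] at hlen
    omega
  omega

def get_line_map_py (text : String) : List Int :=
  pvALoop text.toList 0 [0]

-- ===== PORT B =====
-- text.split('\n') ported as List.splitOn on the code points (exact for a one-char
-- separator); parts[:-1] is the slice parts[:-1] = PySem.List.slice parts none (some (-1)).
def get_line_map_py_alt (text : String) : List Int :=
  let parts := text.toList.splitOn '\n'
  let r := (PySem.List.slice parts none (some (-1))).foldl
      (fun (st : Int × List Int) p =>
        (st.1 + (p.length : Int) + 1, st.2 ++ [st.1 + (p.length : Int) + 1]))
      ((0 : Int), ([0] : List Int))
  r.2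

-- ===== PRECONDITION & SPEC =====
def Spec_get_line_map_py (text : String) (out : List Int) : Prop := out = get_line_map_py_alt text
instance (text : String) (out : List Int) : Decidable (Spec_get_line_map_py text out) := by unfold Spec_get_line_map_py; infer_instance

-- ===== CLAIM (what is proved, stated in full; the proofs are below) =====
def Claim_equal_get_line_map_py : Prop := ∀ (text : String), Dom_get_line_map_py text → Spec_get_line_map_py text (get_line_map_py text)

-- ===== LEMMAS AND PROOFS =====

-- offsets-after-a-newline, as a plain structural recursion (proof-side reference)
def pvNl : List Char → Int → List Int
  | [], _ => []
  | c :: rest, pos => if c = '\n' then (pos + 1) :: pvNl rest (pos + 1) else pvNl rest (pos + 1)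

lemma pvNl_of_not_mem (l : List Char) (pos : Int) (h : '\n' ∉ l) : pvNl l pos = [] := by
  induction l generalizing pos with
  | nil => rfl
  | cons c rest ih =>
    simp only [List.mem_cons, not_or] at h
    have hc : c ≠ '\n' := fun e => h.1 e.symm
    simp [pvNl, hc, ih _ h.2]

lemma pvNl_first (j : Nat) (l : List Char) (pos : Int) (hj : j < l.length)
    (hc : l[j] = '\n') (hmin : ∀ i (h : i < j), l[i]'(by omega) ≠ '\n') :
    pvNl l pos = ((pos + j + 1) :: pvNl (l.drop (j + 1)) (pos + j + 1)) := by
  induction j generalizing l pos with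
  | zero =>
    cases l with
    | nil => simp at hj
    | cons c rest => simp_all [pvNl]
  | succ j ih =>
    cases l with
    | nil => simp at hj
    | cons c rest =>
      have hc0 : c ≠ '\n' := by
        have := hmin 0 (by omega); simpa using this
      have := ih rest (pos + 1) (by simpa using hj) (by simpa using hc)
        (fun i hi => by have := hmin (i + 1) (by omega); simpa using this)
      simp only [pvNl, if_neg hc0, this, List.drop_succ_cons]
      congr 1 <;> push_cast <;> ring_nf

-- single-char prefix of a drop = indexing
lemma pvPrefix_iff (s : List Char) (k : Nat) (hk : k < s.length) :
    (['\n'] : List Char) <+: s.drop k ↔ s[k] = '\n' := by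
  constructor
  · rintro ⟨t, ht⟩
    have hd : s[k] :: s.drop (k + 1) = '\n' :: t := by
      rw [← List.drop_eq_getElem_cons hk]; exact ht.symm
    exact (List.cons_eq_cons.mp hd).1
  · intro h
    have hd : s.drop k = '\n' :: s.drop (k + 1) := by
      rw [List.drop_eq_getElem_cons hk]; simp [h]
    exact ⟨s.drop (k + 1), by rw [hd]; rfl⟩

-- A's loop computes acc ++ pvNl (s.drop curr) curr
lemma pvALoop_eq (s : List Char) (curr : Nat) (acc : List Int) (hc : curr ≤ s.length) :
    pvALoop s curr acc = acc ++ pvNl (s.drop curr) (curr : Int) := by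
  rw [pvALoop]
  rw [dif_pos hc]
  by_cases h : PySem.Chars.findFrom s ['\n'] (curr : Int) none = -1
  · rw [dif_pos h]
    have hnm : ¬ (['\n'] : List Char) <:+: s.drop curr :=
      (PySem.Chars.findFrom_natCast_eq_neg_one_iff s ['\n'] curr hc).mp h
    have : '\n' ∉ s.drop curr := by
      intro hmem
      obtain ⟨u, v, huv⟩ := List.append_of_mem hmem
      exact hnm ⟨u, v, by simp [huv]⟩
    rw [pvNl_of_not_mem _ _ this]; simp
  · rw [dif_neg h]
    set idx := PySem.Chars.findFrom s ['\n'] (curr : Int) none with hidx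
    have spec := PySem.Chars.findFrom_natCast_spec s ['\n'] curr hc h
    have h1 : (curr : Int) ≤ idx := spec.1
    have h2 : idx.toNat < s.length := by
      have hlen : (['\n'] : List Char).length ≤ (List.drop idx.toNat s).length :=
        List.IsPrefix.length_le spec.2.1
      simp [List.length_drop] at hlen; omega
    have hcn : curr ≤ idx.toNat := by omega
    have hchar : s[idx.toNat] = '\n' := (pvPrefix_iff s idx.toNat h2).mp spec.2.1
    -- the newline sits at offset idx.toNat - curr inside s.drop curr
    have hfirst := pvNl_first (idx.toNat - curr) (s.drop curr) (curr : Int)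
      (by simp [List.length_drop]; omega)
      (by rw [List.getElem_drop]; have : curr + (idx.toNat - curr) = idx.toNat := by omega
          simp [this, hchar])
      (fun i hi => by
        rw [List.getElem_drop]
        intro hne
        have hlt : curr + i < idx.toNat := by omega
        exact spec.2.2 (curr + i) (by omega) hlt
          ((pvPrefix_iff s (curr + i) (by omega)).mpr hne))
    have hrec := pvALoop_eq s (idx.toNat + 1) (acc ++ [idx + 1]) (by omega)
    rw [hrec, hfirst]
    rw [List.drop_drop]
    have e1 : (curr : Int) + (idx.toNat - curr : Nat) + 1 = idx + 1 := by
      push_cast; omega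
    have e2 : curr + (idx.toNat - curr + 1) = idx.toNat + 1 := by omega
    have e3 : ((idx.toNat + 1 : Nat) : Int) = idx + 1 := by omega
    rw [e1, e3]
    rw [e2]
    simp
termination_by s.length + 1 - curr
decreasing_by
  have := spec.1
  omega

-- B-side reference recursion over the parts
def pvG : List (List Char) → Int → List Int
  | [], _ => []
  | p :: ps, pos => (pos + p.length + 1) :: pvG ps (pos + p.length + 1)

lemma pvFoldl_eq (parts : List (List Char)) (pos : Int) (acc : List Int) :
    (parts.foldl
      (fun (st : Int × List Int) p =>
        (st.1 + (p.length : Int) + 1, st.2 ++ [st.1 + (p.length : Int) + 1]))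
      (pos, acc)).2 = acc ++ pvG parts pos := by
  induction parts generalizing pos acc with
  | nil => simp [pvG]
  | cons p ps ih => simp [pvG, ih]

lemma pvSlice_neg_one {α : Type} (xs : List α) :
    PySem.List.slice xs none (some (-1)) = xs.dropLast := by
  simpa using PySem.List.slice_to_neg_one (xs := xs)

lemma pvSplitOnP_ne_nil (l : List Char) : l.splitOnP (· == '\n') ≠ [] := by
  induction l with
  | nil => simp
  | cons c rest ih =>
    rw [List.splitOnP_cons]
    split
    · simp
    · cases h : rest.splitOnP (· == '\n') with
      | nil => exact absurd h ih
      | cons a t => simp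

-- prepending characters to the first part only shifts the starting position
lemma pvG_shift (t : List (List Char)) (c : Char) (a : List Char) (pos : Int) :
    pvG (((c :: a) :: t).dropLast) pos = pvG ((a :: t).dropLast) (pos + 1) := by
  cases t with
  | nil => rfl
  | cons b t' =>
    rw [List.dropLast_cons_of_ne_nil (List.cons_ne_nil b t'),
        List.dropLast_cons_of_ne_nil (List.cons_ne_nil b t')]
    simp only [pvG, List.length_cons]
    congr 1 <;> push_cast <;> ring_nf

-- the heart: split-and-accumulate equals the newline-offset recursion
lemma pvG_split (l : List Char) (pos : Int) :
    pvG ((l.splitOn '\n').dropLast) pos = pvNl l pos := by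
  induction l generalizing pos with
  | nil => simp [List.splitOn, pvNl, pvG]
  | cons c rest ih =>
    have ihr := ih (pos + 1)
    rw [List.splitOn] at ihr
    by_cases hc : c = '\n'
    · subst hc
      rw [List.splitOn, List.splitOnP_cons, if_pos (by simp)]
      cases h : rest.splitOnP (· == '\n') with
      | nil => exact absurd h (pvSplitOnP_ne_nil rest)
      | cons a t =>
        rw [h] at ihr
        rw [List.dropLast_cons_of_ne_nil (List.cons_ne_nil a t)]
        simp [pvG, pvNl, ihr]
    · rw [List.splitOn, List.splitOnP_cons, if_neg (by simp [hc])]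
      cases h : rest.splitOnP (· == '\n') with
      | nil => exact absurd h (pvSplitOnP_ne_nil rest)
      | cons a t =>
        rw [h] at ihr
        rw [List.modifyHead_cons, pvG_shift, ihr]
        simp [pvNl, hc]

-- ===== VERDICT (by name: the statement is the Claim_ definition above) =====
theorem get_line_map_py_spec : Claim_equal_get_line_map_py := by
  intro text _
  unfold Spec_get_line_map_py
  show get_line_map_py text = get_line_map_py_alt text
  simp only [get_line_map_py, get_line_map_py_alt]
  rw [pvALoop_eq _ _ _ (Nat.zero_le _), pvSlice_neg_one, pvFoldl_eq, pvG_split]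
  simp
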